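-- pv_equiv track=rewrite | github.com/vibeforge1111/vibeship-spark-intelligence | lib/validation_loop.py | _prompt_polarity
-- ===== SOURCE A (Python) =====
-- from typing import Any, Dict, List, Optional, Tuple
--
-- POS_TRIGGERS = {
--     "prefer", "like", "love", "want", "need", "please", "use", "using", "require",
--     "should", "must", "explain", "examples", "example", "brief", "short", "detailed",
--     "step", "steps", "walk", "show",
--     # Implicit validation words (added 2026-02-21 pipeline audit)
--     "good", "great", "perfect", "works", "better", "best", "correct", "right",
--     "always", "keep", "continue", "thanks", "exactly", "yes",
-- }
--
-- NEG_TRIGGERS = {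
--     "no", "not", "never", "avoid", "dont", "stop", "without", "hate", "dislike",
--     # Implicit contradiction words (added 2026-02-21 pipeline audit)
--     "wrong", "bad", "broken", "fix", "change", "instead", "rather", "redo", "failed",
-- }
--
-- def _prompt_polarity(tokens: List[str], keyword_positions: List[int]) -> Optional[str]:
--     if not keyword_positions:
--         return None
--     has_pos = False
--     has_neg = False
--     for idx in keyword_positions:
--         start = max(0, idx - 3)
--         end = min(len(tokens), idx + 4)
--         window = tokens[start:end]
--         if any(w in NEG_TRIGGERS for w in window):
--             has_neg = True
--         if any(w in POS_TRIGGERS for w in window):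
--             has_pos = True
--
--     if has_neg and not has_pos:
--         return "neg"
--     if has_pos and not has_neg:
--         return "pos"
--     if has_neg and has_pos:
--         return "neg"
--     return None
-- ===== SOURCE B (Python) =====
-- POS_TRIGGERS = {
--     "prefer", "like", "love", "want", "need", "please", "use", "using", "require",
--     "should", "must", "explain", "examples", "example", "brief", "short", "detailed",
--     "step", "steps", "walk", "show",
--     "good", "great", "perfect", "works", "better", "best", "correct", "right",
--     "always", "keep", "continue", "thanks", "exactly", "yes",
-- }
--
-- NEG_TRIGGERS = {
--     "no", "not", "never", "avoid", "dont", "stop", "without", "hate", "dislike",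
--     "wrong", "bad", "broken", "fix", "change", "instead", "rather", "redo", "failed",
-- }
--
--
-- def _prompt_polarity(tokens, keyword_positions):
--     if not keyword_positions:
--         return None
--     n = len(tokens)
--     all_idx = range(n)
--     covered = set()
--     for idx in keyword_positions:
--         # slicing a range yields exactly the indices tokens[start:end] covers
--         covered.update(all_idx[max(0, idx - 3):min(n, idx + 4)])
--     has_neg = any(tokens[i] in NEG_TRIGGERS for i in covered)
--     has_pos = any(tokens[i] in POS_TRIGGERS for i in covered)
--     return "neg" if has_neg else ("pos" if has_pos else None)
-- ===== Notes on version B (the rewrite author's own statement) =====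
-- stated objective: alternative
-- what changed: Replaces repeated overlapping per-position window scans with flag-merging and a four-branch if-chain by first unioning all covered token indices into one deduplicated set and then doing a single membership pass over that set, so each covered token is trigger-tested at most once.
import Mathlib
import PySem

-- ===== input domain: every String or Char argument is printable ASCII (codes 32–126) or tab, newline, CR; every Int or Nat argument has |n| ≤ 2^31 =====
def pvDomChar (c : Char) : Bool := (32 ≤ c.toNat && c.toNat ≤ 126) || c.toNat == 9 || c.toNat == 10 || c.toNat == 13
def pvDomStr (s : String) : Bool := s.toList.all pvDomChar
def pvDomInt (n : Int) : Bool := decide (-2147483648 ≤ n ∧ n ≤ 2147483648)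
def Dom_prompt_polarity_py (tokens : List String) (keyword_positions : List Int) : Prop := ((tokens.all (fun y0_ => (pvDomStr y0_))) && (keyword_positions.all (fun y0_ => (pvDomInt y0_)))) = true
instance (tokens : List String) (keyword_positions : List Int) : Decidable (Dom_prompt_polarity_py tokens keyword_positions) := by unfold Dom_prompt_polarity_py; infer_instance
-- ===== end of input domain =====

-- B replaces A's repeated per-position window scans (flags + four-branch if-chain) by a union of
-- covered indices followed by a single membership pass (alternative decomposition: each covered token is trigger-tested at most once).


-- ===== PORT A =====
-- module constants POS_TRIGGERS / NEG_TRIGGERS (shared by both ports, as in the Python module)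
def posTriggers : List String :=
  ["prefer", "like", "love", "want", "need", "please", "use", "using", "require",
   "should", "must", "explain", "examples", "example", "brief", "short", "detailed",
   "step", "steps", "walk", "show",
   "good", "great", "perfect", "works", "better", "best", "correct", "right",
   "always", "keep", "continue", "thanks", "exactly", "yes"]

def negTriggers : List String :=
  ["no", "not", "never", "avoid", "dont", "stop", "without", "hate", "dislike",
   "wrong", "bad", "broken", "fix", "change", "instead", "rather", "redo", "failed"]

def prompt_polarity_py (tokens : List String) (keyword_positions : List Int) : Option String :=
  if keyword_positions = [] then none
  else
    let st :=
      keyword_positions.foldl (fun (acc : Bool × Bool) idx =>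
        let start := max 0 (idx - 3)
        let stop := min (tokens.length : Int) (idx + 4)
        let window := PySem.List.slice tokens (some start) (some stop)
        let has_neg := if window.any (fun w => negTriggers.contains w) then true else acc.2
        let has_pos := if window.any (fun w => posTriggers.contains w) then true else acc.1
        (has_pos, has_neg)) (false, false)
    if st.2 && !st.1 then some "neg"
    else if st.1 && !st.2 then some "pos"
    else if st.2 && st.1 then some "neg"
    else none

-- ===== PORT B =====
def prompt_polarity_py_alt (tokens : List String) (keyword_positions : List Int) : Option String :=
  if keyword_positions = [] then none
  else
    let n : Int := (tokens.length : Int)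
    let allIdx := PySem.List.pyRange 0 n 1
    let covered : PySem.Set Int :=
      keyword_positions.foldl (fun s idx =>
        PySem.Set.update s (PySem.List.slice allIdx (some (max 0 (idx - 3))) (some (min n (idx + 4))))) []
    -- tokens[i] for i ∈ covered always succeeds (indices come from range(n)); pyGetD is exact there
    let has_neg := covered.any (fun i => negTriggers.contains (PySem.List.pyGetD tokens i ""))
    let has_pos := covered.any (fun i => posTriggers.contains (PySem.List.pyGetD tokens i ""))
    if has_neg then some "neg" else if has_pos then some "pos" else none

-- ===== PRECONDITION & SPEC =====
def Spec_prompt_polarity_py (tokens : List String) (keyword_positions : List Int) (out : Option String) : Prop := out = prompt_polarity_py_alt tokens keyword_positions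
instance (tokens : List String) (keyword_positions : List Int) (out : Option String) : Decidable (Spec_prompt_polarity_py tokens keyword_positions out) := by unfold Spec_prompt_polarity_py; infer_instance

-- ===== CLAIM (what is proved, stated in full; the proofs are below) =====
def Claim_equal_prompt_polarity_py : Prop := ∀ (tokens : List String) (keyword_positions : List Int), Dom_prompt_polarity_py tokens keyword_positions → Spec_prompt_polarity_py tokens keyword_positions (prompt_polarity_py tokens keyword_positions)

-- ===== LEMMAS AND PROOFS =====

-- slice commutes with map (slice is clamped drop/take)
theorem slice_map {α β : Type} (f : α → β) (xs : List α) (a b : Option Int) :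
    PySem.List.slice (xs.map f) a b = (PySem.List.slice xs a b).map f := by
  cases a <;> cases b <;>
    simp [PySem.List.slice, PySem.List.clampIdx, List.map_drop, List.map_take]

-- A's fold computes the 'or' of per-window hits
theorem foldA_char (tokens : List String) (kps : List Int) (hp hn : Bool) :
    kps.foldl (fun (acc : Bool × Bool) idx =>
        let start := max 0 (idx - 3)
        let stop := min (tokens.length : Int) (idx + 4)
        let window := PySem.List.slice tokens (some start) (some stop)
        let has_neg := if window.any (fun w => negTriggers.contains w) then true else acc.2
        let has_pos := if window.any (fun w => posTriggers.contains w) then true else acc.1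
        (has_pos, has_neg)) (hp, hn)
      = (hp || kps.any (fun idx =>
            (PySem.List.slice tokens (some (max 0 (idx - 3))) (some (min (tokens.length : Int) (idx + 4)))).any
              (fun w => posTriggers.contains w)),
         hn || kps.any (fun idx =>
            (PySem.List.slice tokens (some (max 0 (idx - 3))) (some (min (tokens.length : Int) (idx + 4)))).any
              (fun w => negTriggers.contains w))) := by
  induction kps generalizing hp hn with
  | nil => simp
  | cons x xs ih =>
    simp only [List.foldl_cons, List.any_cons]
    rw [ih]
    cases hN : (PySem.List.slice tokens (some (max 0 (x - 3))) (some (min (tokens.length : Int) (x + 4)))).any (fun w => negTriggers.contains w) <;>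
      cases hP : (PySem.List.slice tokens (some (max 0 (x - 3))) (some (min (tokens.length : Int) (x + 4)))).any (fun w => posTriggers.contains w) <;>
      simp only [hN, hP, Bool.false_eq_true, if_false, if_true, Bool.true_or,
        Bool.or_true, Bool.false_or]

-- membership in B's accumulated covered set
theorem mem_coveredFold (win : Int → List Int) (kps : List Int) (s : PySem.Set Int) (x : Int) :
    x ∈ kps.foldl (fun s idx => PySem.Set.update s (win idx)) s ↔
      x ∈ s ∨ ∃ idx ∈ kps, x ∈ win idx := by
  induction kps generalizing s with
  | nil => simp
  | cons y ys ih =>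
    simp only [List.foldl_cons, ih, PySem.Set.mem_update, List.mem_cons]
    constructor
    · rintro ((h | h) | ⟨i, hi, hx⟩)
      · exact Or.inl h
      · exact Or.inr ⟨y, Or.inl rfl, h⟩
      · exact Or.inr ⟨i, Or.inr hi, hx⟩
    · rintro (h | ⟨i, (rfl | hi), hx⟩)
      · exact Or.inl (Or.inl h)
      · exact Or.inl (Or.inr hx)
      · exact Or.inr ⟨i, hi, hx⟩

-- any over B's covered set = any over per-position index windows
theorem any_covered (win : Int → List Int) (kps : List Int) (q : Int → Bool) :
    (kps.foldl (fun s idx => PySem.Set.update s (win idx)) ([] : PySem.Set Int)).any q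
      = kps.any (fun idx => (win idx).any q) := by
  rw [Bool.eq_iff_iff]
  simp only [List.any_eq_true, mem_coveredFold]
  constructor
  · rintro ⟨x, (h | ⟨i, hi, hx⟩), hq⟩
    · simp at h
    · exact ⟨i, hi, x, hx, hq⟩
  · rintro ⟨i, hi, x, hx, hq⟩
    exact ⟨x, Or.inr ⟨i, hi, hx⟩, hq⟩

-- tokens are the index window mapped through pyGetD
theorem window_eq_map (tokens : List String) (a b : Int) :
    PySem.List.slice tokens (some a) (some b)
      = (PySem.List.slice (PySem.List.pyRange 0 (tokens.length : Int) 1) (some a) (some b)).map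
          (fun i => PySem.List.pyGetD tokens i "") := by
  conv_lhs => rw [← PySem.List.map_pyGetD_pyRange_zero' tokens ""]
  rw [slice_map]

-- ===== VERDICT (by name: the statement is the Claim_ definition above) =====
theorem prompt_polarity_py_spec : Claim_equal_prompt_polarity_py := by
  intro tokens kps _
  unfold Spec_prompt_polarity_py prompt_polarity_py prompt_polarity_py_alt
  by_cases hk : kps = []
  · simp [hk]
  · simp only [hk, reduceIte]
    rw [foldA_char]
    rw [any_covered (fun idx => PySem.List.slice (PySem.List.pyRange 0 (tokens.length : Int) 1)
          (some (max 0 (idx - 3))) (some (min (tokens.length : Int) (idx + 4)))) kps,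
        any_covered (fun idx => PySem.List.slice (PySem.List.pyRange 0 (tokens.length : Int) 1)
          (some (max 0 (idx - 3))) (some (min (tokens.length : Int) (idx + 4)))) kps]
    simp only [Bool.false_or]
    have hrewrite : ∀ (trig : List String),
        (kps.any (fun idx =>
          (PySem.List.slice (PySem.List.pyRange 0 (tokens.length : Int) 1)
            (some (max 0 (idx - 3))) (some (min (tokens.length : Int) (idx + 4)))).any
              (fun i => trig.contains (PySem.List.pyGetD tokens i ""))))
        = (kps.any (fun idx =>
          (PySem.List.slice tokens (some (max 0 (idx - 3))) (some (min (tokens.length : Int) (idx + 4)))).any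
              (fun w => trig.contains w))) := by
      intro trig
      congr 1
      funext idx
      rw [window_eq_map, List.any_map]
      rfl
    rw [hrewrite, hrewrite]
    set N := kps.any (fun idx =>
      (PySem.List.slice tokens (some (max 0 (idx - 3))) (some (min (tokens.length : Int) (idx + 4)))).any
        (fun w => negTriggers.contains w)) with hN
    set P := kps.any (fun idx =>
      (PySem.List.slice tokens (some (max 0 (idx - 3))) (some (min (tokens.length : Int) (idx + 4)))).any
        (fun w => posTriggers.contains w)) with hP
    cases N <;> cases P <;> simp
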